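-- pv_equiv track=rewrite | github.com/Asish-08/AI-project-work | Project4/3.logicagent/wumpus_kb.py | axiom_generator_at_most_one_wumpus
-- ===== SOURCE A (Python) =====
-- def wumpus_str(x, y):
--     "There is a Wumpus at <x>,<y>"
--     return 'W{0}_{1}'.format(x, y)
--
-- def axiom_generator_at_most_one_wumpus(xmin, xmax, ymin, ymax):
--     """
--     Assert that there is at at most one Wumpus.
--
--     xmin, xmax, ymin, ymax := the bounds of the environment.
--     """
--     axiom_str = ''
--     "*** YOUR CODE HERE ***"
--     # Comment or delete the next line once this function has been implemented.
--     #utils.print_not_implemented()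
--
--     max_wumpus_location = []
--
--     #generate implications for each location (i, j)
--     for i in range(xmin, xmax + 1):
--         for j in range(ymin, ymax + 1):
--             #initialize the implication string for the current location
--             wumpus_implication = '(' + wumpus_str(i, j) + ' >> ('
--
--             #initialize an empty list to store the clauses for wumpus absence
--             wumpus_absent_clauses = []
--
--             #iterate over each coordinate in the grid
--             for k in range(xmin, xmax + 1):
--                 for l in range(ymin, ymax + 1):
--                     #check if the coordinate is not the same as the current location (i, j)
--                     if (k, l) != (i, j):
--                         #append the negation of the wumpus presence at the current coordinate to the list
--                         wumpus_absent_clauses.append('~' + wumpus_str(k, l))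
--
--             #joining the clauses with ' & ' and add them to the wumpus_implication string
--             wumpus_implication += ' & '.join(wumpus_absent_clauses)
--
--             #adding the closing parentheses to complete the implication
--             wumpus_implication += '))'
--
--             #appending the implication for the current location to max_wumpus_location
--             max_wumpus_location.append(wumpus_implication)
--
--     #joining the implications with ' & ' and add them to axiom_str
--     axiom_str += ' & '.join(max_wumpus_location)
--     return axiom_str
-- ===== SOURCE B (Python) =====
-- def wumpus_str(x, y):
--     "There is a Wumpus at <x>,<y>"
--     return 'W{0}_{1}'.format(x, y)
--
-- def axiom_generator_at_most_one_wumpus(xmin, xmax, ymin, ymax):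
--     """
--     Assert that there is at at most one Wumpus.
--
--     xmin, xmax, ymin, ymax := the bounds of the environment.
--     """
--     negs = ['~' + wumpus_str(i, j)
--             for i in range(xmin, xmax + 1)
--             for j in range(ymin, ymax + 1)]
--     # pre[k] = ' & '.join(negs[:k]), built by one forward running accumulation
--     pre = []
--     acc = ''
--     for neg in negs:
--         pre.append(acc)
--         acc = neg if acc == '' else acc + ' & ' + neg
--     # suf[k] = ' & '.join(negs[k+1:]), built by one backward running accumulation
--     suf = []
--     acc = ''
--     for neg in reversed(negs):
--         suf.append(acc)
--         acc = neg if acc == '' else neg + ' & ' + acc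
--     suf.reverse()
--     out = []
--     for neg, p, s in zip(negs, pre, suf):
--         body = p + ' & ' + s if p and s else p + s
--         out.append('(' + neg[1:] + ' >> (' + body + '))')
--     return ' & '.join(out)
-- ===== Notes on version B (the rewrite author's own statement) =====
-- stated objective: alternative
-- what changed: B uses the prefix/suffix accumulation pattern (product-except-self): two linear passes build running ' & '-joins of the negations before and after each cell, and each implication body is spliced from those two accumulators, instead of A's per-cell rescan of the whole grid with an equality test and a fresh join.
import Mathlib
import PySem

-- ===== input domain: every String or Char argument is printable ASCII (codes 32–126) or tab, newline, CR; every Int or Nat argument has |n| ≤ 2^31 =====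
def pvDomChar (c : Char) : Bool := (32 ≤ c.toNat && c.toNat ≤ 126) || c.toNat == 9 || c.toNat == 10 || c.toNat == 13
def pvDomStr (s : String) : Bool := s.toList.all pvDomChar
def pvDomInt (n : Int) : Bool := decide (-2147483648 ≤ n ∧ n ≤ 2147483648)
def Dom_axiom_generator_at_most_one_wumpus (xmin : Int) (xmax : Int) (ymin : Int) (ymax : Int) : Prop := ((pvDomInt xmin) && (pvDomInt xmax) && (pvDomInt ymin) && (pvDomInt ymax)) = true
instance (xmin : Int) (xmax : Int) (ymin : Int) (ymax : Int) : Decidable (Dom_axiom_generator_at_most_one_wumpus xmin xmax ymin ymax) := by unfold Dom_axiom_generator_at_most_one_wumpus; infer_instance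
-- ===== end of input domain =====

-- B replaces A's per-cell rescan of the whole grid by the prefix/suffix
-- accumulation pattern ("product except self"): two linear passes build the
-- running joins of the negations before and after each cell, and each
-- implication body is assembled from those two accumulators (objective:
-- alternative). Return values are proved identical.

-- ===== PORT A =====
def wumpusStr (x : Int) (y : Int) : String :=
  "W" ++ PySem.Int.toStr x ++ "_" ++ PySem.Int.toStr y

def axiom_generator_at_most_one_wumpus (xmin : Int) (xmax : Int) (ymin : Int) (ymax : Int) : String :=
  let axiom_str : String := ""
  let max_wumpus_location : List String :=
    (PySem.List.pyRange xmin (xmax + 1) 1).foldl (fun acc i =>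
      (PySem.List.pyRange ymin (ymax + 1) 1).foldl (fun acc j =>
        let wumpus_absent_clauses : List String :=
          (PySem.List.pyRange xmin (xmax + 1) 1).foldl (fun cl k =>
            (PySem.List.pyRange ymin (ymax + 1) 1).foldl (fun cl l =>
              if (k, l) ≠ (i, j) then cl ++ ["~" ++ wumpusStr k l] else cl) cl) []
        acc ++ ["(" ++ wumpusStr i j ++ " >> (" ++ PySem.Str.join " & " wumpus_absent_clauses ++ "))"]) acc) []
  axiom_str ++ PySem.Str.join " & " max_wumpus_location

-- ===== PORT B =====
def wumpusStrAlt (x : Int) (y : Int) : String :=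
  "W" ++ PySem.Int.toStr x ++ "_" ++ PySem.Int.toStr y

-- the forward pass:  for neg in negs: pre.append(acc); acc = neg if acc == '' else acc + ' & ' + neg
def pvPreAcc : List String → String → List String
  | [], _ => []
  | neg :: rest, acc => acc :: pvPreAcc rest (if acc = "" then neg else acc ++ " & " ++ neg)

-- the backward pass:  for neg in reversed(negs): suf.append(acc); acc = neg if acc == '' else neg + ' & ' + acc
def pvSufAcc : List String → String → List String
  | [], _ => []
  | neg :: rest, acc => acc :: pvSufAcc rest (if acc = "" then neg else neg ++ " & " ++ acc)

def axiom_generator_at_most_one_wumpus_alt (xmin : Int) (xmax : Int) (ymin : Int) (ymax : Int) : String :=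
  let negs : List String :=
    (PySem.List.pyRange xmin (xmax + 1) 1).flatMap (fun i =>
      (PySem.List.pyRange ymin (ymax + 1) 1).map (fun j => "~" ++ wumpusStrAlt i j))
  let pre : List String := pvPreAcc negs ""
  let suf : List String := (pvSufAcc negs.reverse "").reverse
  let out : List String :=
    (negs.zip (pre.zip suf)).map (fun t =>
      let body := if t.2.1 ≠ "" ∧ t.2.2 ≠ "" then t.2.1 ++ " & " ++ t.2.2 else t.2.1 ++ t.2.2
      "(" ++ PySem.Str.slice t.1 (some 1) none ++ " >> (" ++ body ++ "))")
  PySem.Str.join " & " out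

-- ===== PRECONDITION & SPEC =====
def Spec_axiom_generator_at_most_one_wumpus (xmin : Int) (xmax : Int) (ymin : Int) (ymax : Int) (out : String) : Prop := out = axiom_generator_at_most_one_wumpus_alt xmin xmax ymin ymax
instance (xmin : Int) (xmax : Int) (ymin : Int) (ymax : Int) (out : String) : Decidable (Spec_axiom_generator_at_most_one_wumpus xmin xmax ymin ymax out) := by unfold Spec_axiom_generator_at_most_one_wumpus; infer_instance

-- ===== CLAIM (what is proved, stated in full; the proofs are below) =====
def Claim_equal_axiom_generator_at_most_one_wumpus : Prop := ∀ (xmin : Int) (xmax : Int) (ymin : Int) (ymax : Int), Dom_axiom_generator_at_most_one_wumpus xmin xmax ymin ymax → Spec_axiom_generator_at_most_one_wumpus xmin xmax ymin ymax (axiom_generator_at_most_one_wumpus xmin xmax ymin ymax)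

-- ===== LEMMAS AND PROOFS =====

-- the row-major list of coordinate pairs both programs traverse
def pvPairs (xmin : Int) (xmax : Int) (ymin : Int) (ymax : Int) : List (Int × Int) :=
  (PySem.List.pyRange xmin (xmax + 1) 1).flatMap (fun i =>
    (PySem.List.pyRange ymin (ymax + 1) 1).map (fun j => (i, j)))

theorem pvPairs_nodup (xmin xmax ymin ymax : Int) : (pvPairs xmin xmax ymin ymax).Nodup :=
  List.Nodup.product (PySem.List.nodup_pyRange_one xmin (xmax + 1))
    (PySem.List.nodup_pyRange_one ymin (ymax + 1))

-- in a duplicate-free list, filtering out the element at index k is take k ++ drop (k+1)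
theorem pv_filter_ne_getElem {α : Type} [DecidableEq α] (xs : List α) (k : Nat)
    (hk : k < xs.length) (hnd : xs.Nodup) :
    xs.filter (fun y => decide (y ≠ xs[k])) = xs.take k ++ xs.drop (k + 1) := by
  induction xs generalizing k with
  | nil => simp at hk
  | cons x xs ih =>
    rcases List.nodup_cons.mp hnd with ⟨hx, hnd'⟩
    cases k with
    | zero =>
      simp only [List.getElem_cons_zero, List.take_zero, List.nil_append, List.drop_succ_cons,
        List.drop_zero, List.filter_cons]
      simp only [ne_eq, not_true_eq_false, decide_false]
      exact List.filter_eq_self.mpr (fun a ha => by simp; rintro rfl; exact hx ha)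
    | succ k =>
      have hk' : k < xs.length := by simpa using hk
      have hne : x ≠ xs[k] := fun h => hx (h ▸ List.getElem_mem hk')
      simp only [List.getElem_cons_succ, List.filter_cons, List.take_succ_cons,
        List.drop_succ_cons, List.cons_append]
      rw [if_pos (by simpa using hne)]
      exact congrArg (x :: ·) (ih k hk' hnd')

-- A's clause loop for a fixed cell, expressed over the pair list
theorem pvA_absent (xmin xmax ymin ymax : Int) (c : Int × Int) :
    (PySem.List.pyRange xmin (xmax + 1) 1).foldl (fun cl k =>
        (PySem.List.pyRange ymin (ymax + 1) 1).foldl (fun cl l =>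
          if (k, l) ≠ c then cl ++ ["~" ++ wumpusStr k l] else cl) cl) [] =
      ((pvPairs xmin xmax ymin ymax).filter (fun y => decide (y ≠ c))).map
        (fun y => "~" ++ wumpusStr y.1 y.2) := by
  have h1 : ∀ (k : Int) (cl : List String),
      (PySem.List.pyRange ymin (ymax + 1) 1).foldl (fun cl l =>
        if (k, l) ≠ c then cl ++ ["~" ++ wumpusStr k l] else cl) cl =
      cl ++ ((PySem.List.pyRange ymin (ymax + 1) 1).filter
          (fun l => decide ((k, l) ≠ c))).map (fun l => "~" ++ wumpusStr k l) := by
    intro k cl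
    exact PySem.List.foldl_append_ite (fun l => (k, l) ≠ c) (fun l => "~" ++ wumpusStr k l) _ _
  calc (PySem.List.pyRange xmin (xmax + 1) 1).foldl (fun cl k =>
        (PySem.List.pyRange ymin (ymax + 1) 1).foldl (fun cl l =>
          if (k, l) ≠ c then cl ++ ["~" ++ wumpusStr k l] else cl) cl) []
      = (PySem.List.pyRange xmin (xmax + 1) 1).foldl (fun cl k =>
          cl ++ ((PySem.List.pyRange ymin (ymax + 1) 1).filter
            (fun l => decide ((k, l) ≠ c))).map (fun l => "~" ++ wumpusStr k l)) [] := by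
        apply PySem.List.foldl_congr_mem
        intro cl k _
        exact h1 k cl
    _ = (PySem.List.pyRange xmin (xmax + 1) 1).flatMap (fun k =>
          ((PySem.List.pyRange ymin (ymax + 1) 1).filter
            (fun l => decide ((k, l) ≠ c))).map (fun l => "~" ++ wumpusStr k l)) := by
        simpa using PySem.List.foldl_append_eq_flatMap _ _ []
    _ = _ := by
        simp only [pvPairs, List.filter_flatMap, List.map_flatMap]
        refine List.flatMap_congr (fun k _ => ?_)
        rw [List.filter_map, List.map_map]
        rfl

-- A's implication list is a row-major map over the pair list
theorem pvA_impls (xmin xmax ymin ymax : Int) :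
    (PySem.List.pyRange xmin (xmax + 1) 1).foldl (fun acc i =>
      (PySem.List.pyRange ymin (ymax + 1) 1).foldl (fun acc j =>
        let wumpus_absent_clauses : List String :=
          (PySem.List.pyRange xmin (xmax + 1) 1).foldl (fun cl k =>
            (PySem.List.pyRange ymin (ymax + 1) 1).foldl (fun cl l =>
              if (k, l) ≠ (i, j) then cl ++ ["~" ++ wumpusStr k l] else cl) cl) []
        acc ++ ["(" ++ wumpusStr i j ++ " >> (" ++ PySem.Str.join " & " wumpus_absent_clauses ++ "))"]) acc) [] =
    (pvPairs xmin xmax ymin ymax).map (fun c =>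
      "(" ++ wumpusStr c.1 c.2 ++ " >> (" ++
        PySem.Str.join " & " (((pvPairs xmin xmax ymin ymax).filter (fun y => decide (y ≠ c))).map
          (fun y => "~" ++ wumpusStr y.1 y.2)) ++ "))") := by
  have h1 : ∀ (i : Int) (acc : List String),
      (PySem.List.pyRange ymin (ymax + 1) 1).foldl (fun acc j =>
        let wumpus_absent_clauses : List String :=
          (PySem.List.pyRange xmin (xmax + 1) 1).foldl (fun cl k =>
            (PySem.List.pyRange ymin (ymax + 1) 1).foldl (fun cl l =>
              if (k, l) ≠ (i, j) then cl ++ ["~" ++ wumpusStr k l] else cl) cl) []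
        acc ++ ["(" ++ wumpusStr i j ++ " >> (" ++ PySem.Str.join " & " wumpus_absent_clauses ++ "))"]) acc =
      acc ++ (PySem.List.pyRange ymin (ymax + 1) 1).map (fun j =>
        "(" ++ wumpusStr i j ++ " >> (" ++
          PySem.Str.join " & " (((pvPairs xmin xmax ymin ymax).filter (fun y => decide (y ≠ (i, j)))).map
            (fun y => "~" ++ wumpusStr y.1 y.2)) ++ "))") := by
    intro i acc
    simp only [pvA_absent xmin xmax ymin ymax]
    exact PySem.List.foldl_append_singleton_eq_map _ _ _
  calc _ = (PySem.List.pyRange xmin (xmax + 1) 1).foldl (fun acc i =>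
          acc ++ (PySem.List.pyRange ymin (ymax + 1) 1).map (fun j =>
            "(" ++ wumpusStr i j ++ " >> (" ++
              PySem.Str.join " & " (((pvPairs xmin xmax ymin ymax).filter (fun y => decide (y ≠ (i, j)))).map
                (fun y => "~" ++ wumpusStr y.1 y.2)) ++ "))")) [] := by
        apply PySem.List.foldl_congr_mem
        intro acc i _
        exact h1 i acc
    _ = _ := by
        rw [show ((pvPairs xmin xmax ymin ymax).map (fun c =>
          "(" ++ wumpusStr c.1 c.2 ++ " >> (" ++
            PySem.Str.join " & " (((pvPairs xmin xmax ymin ymax).filter (fun y => decide (y ≠ c))).map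
              (fun y => "~" ++ wumpusStr y.1 y.2)) ++ "))")) = (PySem.List.pyRange xmin (xmax + 1) 1).flatMap
            (fun i => (PySem.List.pyRange ymin (ymax + 1) 1).map (fun j =>
              "(" ++ wumpusStr i j ++ " >> (" ++
                PySem.Str.join " & " (((pvPairs xmin xmax ymin ymax).filter (fun y => decide (y ≠ (i, j)))).map
                  (fun y => "~" ++ wumpusStr y.1 y.2)) ++ "))"))
          from by simp [pvPairs, List.map_flatMap, List.map_map]; rfl]
        simpa using PySem.List.foldl_append_eq_flatMap _ _ []

-- ===== join facts (List Char level, lifted to String) =====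

theorem pvCJoin_ne_nil (sep : List Char) (a : List Char) (l : List (List Char))
    (ha : a ≠ []) : PySem.Chars.join sep (a :: l) ≠ [] := by
  cases l with
  | nil => simpa [PySem.Chars.join_singleton] using ha
  | cons b l => simp [PySem.Chars.join_cons_cons, ha]

theorem pvCJoin_append (sep : List Char) (l1 l2 : List (List Char))
    (h1 : l1 ≠ []) (h2 : l2 ≠ []) :
    PySem.Chars.join sep (l1 ++ l2) =
      PySem.Chars.join sep l1 ++ sep ++ PySem.Chars.join sep l2 := by
  induction l1 with
  | nil => exact absurd rfl h1
  | cons a l1 ih =>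
    cases l1 with
    | nil =>
      cases l2 with
      | nil => exact absurd rfl h2
      | cons b l2 => simp [PySem.Chars.join_singleton, PySem.Chars.join_cons_cons]
    | cons a2 l1 =>
      have := ih (by simp)
      simp only [List.cons_append] at *
      rw [PySem.Chars.join_cons_cons, PySem.Chars.join_cons_cons, this]
      simp [List.append_assoc]

theorem pvSJoin_ne_empty (a : String) (l : List String) (ha : a ≠ "") :
    PySem.Str.join " & " (a :: l) ≠ "" := by
  intro h
  have := congrArg String.toList h
  rw [PySem.Str.toList_join] at this
  refine pvCJoin_ne_nil " & ".toList a.toList (l.map String.toList) ?_ (by simpa using this)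
  intro hn
  exact ha (String.toList_inj.mp (by simp [hn]))

theorem pvSJoin_empty_iff (zs : List String) (hz : ∀ s ∈ zs, s ≠ "") :
    PySem.Str.join " & " zs = "" ↔ zs = [] := by
  constructor
  · intro h
    cases zs with
    | nil => rfl
    | cons a l => exact absurd h (pvSJoin_ne_empty a l (hz a (by simp)))
  · rintro rfl
    apply String.toList_inj.mp
    simp [PySem.Str.toList_join, PySem.Chars.join_nil]

theorem pvSJoin_single (x : String) : PySem.Str.join " & " [x] = x := by
  apply String.toList_inj.mp
  simp [PySem.Str.toList_join, PySem.Chars.join_singleton]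

theorem pvSJoin_append (l1 l2 : List String) (h1 : l1 ≠ []) (h2 : l2 ≠ []) :
    PySem.Str.join " & " (l1 ++ l2) =
      PySem.Str.join " & " l1 ++ " & " ++ PySem.Str.join " & " l2 := by
  apply String.toList_inj.mp
  simp only [PySem.Str.toList_join, String.toList_append, List.map_append]
  exact pvCJoin_append _ _ _ (by simpa using h1) (by simpa using h2)

theorem pvSJoin_snoc (zs : List String) (x : String) :
    PySem.Str.join " & " (zs ++ [x]) =
      if zs = [] then x else PySem.Str.join " & " zs ++ " & " ++ x := by
  cases zs with
  | nil => simpa using pvSJoin_single x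
  | cons a l =>
    rw [if_neg (by simp), pvSJoin_append (a :: l) [x] (by simp) (by simp), pvSJoin_single]

theorem pvSJoin_cons' (x : String) (zs : List String) :
    PySem.Str.join " & " (x :: zs) =
      if zs = [] then x else x ++ " & " ++ PySem.Str.join " & " zs := by
  cases zs with
  | nil => simpa using pvSJoin_single x
  | cons a l =>
    rw [if_neg (by simp), show x :: a :: l = [x] ++ (a :: l) from rfl,
      pvSJoin_append [x] (a :: l) (by simp) (by simp), pvSJoin_single]

-- ===== accumulator characterisations =====

theorem pvPreAcc_spec (xs : List String) : ∀ (zs : List String),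
    (∀ s ∈ zs, s ≠ "") → (∀ s ∈ xs, s ≠ "") →
    pvPreAcc xs (PySem.Str.join " & " zs) =
      (List.range xs.length).map (fun k => PySem.Str.join " & " (zs ++ xs.take k)) := by
  induction xs with
  | nil => intro zs _ _; simp [pvPreAcc]
  | cons x xs ih =>
    intro zs hz hx
    have hx' : x ≠ "" := hx x (by simp)
    have hacc : (if PySem.Str.join " & " zs = "" then x
        else PySem.Str.join " & " zs ++ " & " ++ x) = PySem.Str.join " & " (zs ++ [x]) := by
      rw [pvSJoin_snoc]
      by_cases h : zs = []
      · rw [if_pos h, if_pos ((pvSJoin_empty_iff zs hz).mpr h)]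
      · rw [if_neg h, if_neg (fun he => h ((pvSJoin_empty_iff zs hz).mp he))]
    have hz' : ∀ s ∈ zs ++ [x], s ≠ "" := by
      intro s hs
      rcases List.mem_append.mp hs with h | h
      · exact hz s h
      · have : s = x := by simpa using h
        exact this ▸ hx'
    rw [pvPreAcc, hacc, ih (zs ++ [x]) hz' (fun s hs => hx s (by simp [hs]))]
    rw [List.length_cons, List.range_succ_eq_map, List.map_cons, List.map_map]
    simp [Function.comp, List.take_succ_cons, List.append_assoc]

theorem pvSufAcc_spec (ys : List String) : ∀ (zs : List String),
    (∀ s ∈ zs, s ≠ "") → (∀ s ∈ ys, s ≠ "") →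
    pvSufAcc ys (PySem.Str.join " & " zs) =
      (List.range ys.length).map (fun k => PySem.Str.join " & " ((ys.take k).reverse ++ zs)) := by
  induction ys with
  | nil => intro zs _ _; simp [pvSufAcc]
  | cons y ys ih =>
    intro zs hz hy
    have hy' : y ≠ "" := hy y (by simp)
    have hacc : (if PySem.Str.join " & " zs = "" then y
        else y ++ " & " ++ PySem.Str.join " & " zs) = PySem.Str.join " & " (y :: zs) := by
      rw [pvSJoin_cons']
      by_cases h : zs = []
      · rw [if_pos h, if_pos ((pvSJoin_empty_iff zs hz).mpr h)]
      · rw [if_neg h, if_neg (fun he => h ((pvSJoin_empty_iff zs hz).mp he))]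
    have hz' : ∀ s ∈ y :: zs, s ≠ "" := by
      intro s hs
      rcases List.mem_cons.mp hs with h | h
      · exact h ▸ hy'
      · exact hz s h
    rw [pvSufAcc, hacc, ih (y :: zs) hz' (fun s hs => hy s (by simp [hs]))]
    rw [List.length_cons, List.range_succ_eq_map, List.map_cons, List.map_map]
    simp [Function.comp, List.take_succ_cons, List.append_assoc]

-- body assembly from the two accumulators equals the join over the spliced list
theorem pvBody_eq (l1 l2 : List String) (h1 : ∀ s ∈ l1, s ≠ "") (h2 : ∀ s ∈ l2, s ≠ "") :
    (if PySem.Str.join " & " l1 ≠ "" ∧ PySem.Str.join " & " l2 ≠ "" then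
        PySem.Str.join " & " l1 ++ " & " ++ PySem.Str.join " & " l2
      else PySem.Str.join " & " l1 ++ PySem.Str.join " & " l2) =
    PySem.Str.join " & " (l1 ++ l2) := by
  by_cases e1 : l1 = []
  · subst e1
    rw [if_neg (by simp [pvSJoin_empty_iff [] (by simp)])]
    simp [pvSJoin_empty_iff]
  · by_cases e2 : l2 = []
    · subst e2
      rw [if_neg (by simp [(pvSJoin_empty_iff [] (by simp)).mpr rfl])]
      rw [(pvSJoin_empty_iff [] (by simp)).mpr rfl]
      simp [String.append_empty]
    · rw [if_pos ⟨fun h => e1 ((pvSJoin_empty_iff l1 h1).mp h),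
        fun h => e2 ((pvSJoin_empty_iff l2 h2).mp h)⟩, pvSJoin_append l1 l2 e1 e2]

-- neg[1:] recovers the cell label
theorem pvSlice_tilde (w : String) : PySem.Str.slice ("~" ++ w) (some 1) none = w := by
  apply String.toList_inj.mp
  rw [PySem.Str.toList_slice, PySem.Chars.slice_eq_listSlice, PySem.List.slice_from_one]
  simp [String.toList_append]

theorem pvNeg_ne_empty (w : String) : ("~" ++ w : String) ≠ "" := by
  intro h
  have := congrArg String.toList h
  simp [String.toList_append] at this

-- ===== VERDICT (by name: the statement is the Claim_ definition above) =====
theorem axiom_generator_at_most_one_wumpus_spec : Claim_equal_axiom_generator_at_most_one_wumpus := by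
  intro xmin xmax ymin ymax _
  unfold Spec_axiom_generator_at_most_one_wumpus
  unfold axiom_generator_at_most_one_wumpus axiom_generator_at_most_one_wumpus_alt
  simp only []
  rw [pvA_impls]
  rw [show ∀ s : String, "" ++ s = s from fun s => rfl]
  set P := pvPairs xmin xmax ymin ymax with hP
  have hnegs : (PySem.List.pyRange xmin (xmax + 1) 1).flatMap (fun i =>
      (PySem.List.pyRange ymin (ymax + 1) 1).map (fun j => "~" ++ wumpusStrAlt i j)) =
      P.map (fun c => "~" ++ wumpusStr c.1 c.2) := by
    simp [hP, pvPairs, List.map_flatMap, List.map_map]; rfl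
  rw [hnegs]
  set negs := P.map (fun c => "~" ++ wumpusStr c.1 c.2) with hnegsdef
  have hne : ∀ s ∈ negs, s ≠ "" := by
    intro s hs
    rcases List.mem_map.mp hs with ⟨c, _, rfl⟩
    exact pvNeg_ne_empty _
  have hpre : pvPreAcc negs "" =
      (List.range negs.length).map (fun k => PySem.Str.join " & " (negs.take k)) := by
    have h0 : ("" : String) = PySem.Str.join " & " [] := by
      apply String.toList_inj.mp
      simp [PySem.Str.toList_join, PySem.Chars.join_nil]
    rw [h0, pvPreAcc_spec negs [] (by simp) hne]
    simp
  have hsuf : pvSufAcc negs.reverse "" =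
      (List.range negs.length).map (fun k =>
        PySem.Str.join " & " ((negs.reverse.take k).reverse)) := by
    have h0 : ("" : String) = PySem.Str.join " & " [] := by
      apply String.toList_inj.mp
      simp [PySem.Str.toList_join, PySem.Chars.join_nil]
    rw [h0, pvSufAcc_spec negs.reverse [] (by simp) (by simpa using hne)]
    simp
  rw [hpre, hsuf]
  congr 1
  have hlen : negs.length = P.length := by simp [hnegsdef]
  apply List.ext_getElem
  · simp [hlen]
  · intro k hkL hkR
    have hkP : k < P.length := by simpa using hkL
    have hkN : k < negs.length := by simpa [hlen] using hkP
    simp only [List.getElem_map, List.getElem_zip, List.getElem_reverse, List.length_map,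
      List.length_range, List.getElem_range]
    -- suffix entry: join of negs.drop (k+1)
    have hsufk : PySem.Str.join " & "
        ((negs.reverse.take (negs.length - 1 - k)).reverse) =
        PySem.Str.join " & " (negs.drop (k + 1)) := by
      rw [List.take_reverse, List.reverse_reverse]
      rw [show negs.length - (negs.length - 1 - k) = k + 1 from by rw [hlen]; omega]
    rw [hsufk]
    -- the head: slice of "~" ++ label
    rw [show negs[k] = "~" ++ wumpusStr P[k].1 P[k].2 from by simp [hnegsdef],
      pvSlice_tilde]
    -- the body
    rw [pvBody_eq (negs.take k) (negs.drop (k + 1))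
      (fun s hs => hne s (List.mem_of_mem_take hs))
      (fun s hs => hne s (List.mem_of_mem_drop hs))]
    -- A's filter equals the splice
    rw [pv_filter_ne_getElem P k hkP (by rw [hP]; exact pvPairs_nodup xmin xmax ymin ymax)]
    rw [List.map_append, ← List.map_take, ← List.map_drop]
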